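-- pv_equiv track=rewrite | github.com/bodekerscientific/wikidot_tools | WikidotHelpers.py | CannonicizeString
-- ===== SOURCE A (Python) =====
-- def CannonicizeString(name):
--     out = []
--     inAlpha = False
--     inJunk = False
--     for c in name:
--         if c.isalnum() or c == ':':     # ":", the category separator, is an honorary alphanumeric
--             if inJunk:
--                 out.append("-")
--             out.append(c)
--             inJunk = False
--             inAlpha = True
--         else:
--             inJunk = True
--             inAlpha = False
--     # Remove any leading or trailing "-"
--     canname=''.join(out)
--     if canname[0] == "-":
--         canname=canname[1:]
--     if canname[:-1] == "-":
--         canname=canname[:-1]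
--     return canname
-- ===== SOURCE B (Python) =====
-- def CannonicizeString(name):
--     # Replace every non-kept character by a space, split on whitespace, join words with dashes.
--     return '-'.join(''.join(c if c.isalnum() or c == ':' else ' ' for c in name).split())
-- ===== Notes on version B (the rewrite author's own statement) =====
-- stated objective: idiomatic
-- what changed: B replaces A's two-flag character state machine (with post-hoc leading/trailing dash stripping) by a substitute-junk-with-space, whitespace-split, '-'.join pipeline.
-- outside the precondition, e.g. on CannonicizeString('-'): A raises IndexError, B returns ''
import Mathlib
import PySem

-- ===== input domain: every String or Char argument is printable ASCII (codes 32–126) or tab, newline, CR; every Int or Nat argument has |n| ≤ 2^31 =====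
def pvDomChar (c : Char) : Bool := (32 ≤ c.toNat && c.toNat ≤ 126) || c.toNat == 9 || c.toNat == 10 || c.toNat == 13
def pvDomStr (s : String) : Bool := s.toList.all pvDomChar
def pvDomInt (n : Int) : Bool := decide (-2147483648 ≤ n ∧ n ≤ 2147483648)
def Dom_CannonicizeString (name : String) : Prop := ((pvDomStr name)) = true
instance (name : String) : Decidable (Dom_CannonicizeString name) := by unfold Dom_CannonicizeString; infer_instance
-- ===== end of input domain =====

-- B canonicalizes by substituting ' ' for junk characters, whitespace-splitting and '-'-joining,
-- instead of A's two-flag state machine with post-hoc dash stripping (objective: idiomatic).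


-- the kept-character predicate `c.isalnum() or c == ':'` both Pythons write inline
def pvKeep (c : Char) : Bool := PySem.Chars.isalnum c || c == ':'

-- ===== PORT A =====
def CannonicizeString (name : String) : String :=
  let st := name.toList.foldl
    (fun (st : List Char × Bool × Bool) c =>
      if pvKeep c then
        ((if st.2.2 then st.1 ++ ['-'] else st.1) ++ [c], true, false)
      else
        (st.1, false, true))
    ([], false, false)
  let canname := st.1
  match PySem.List.pyGet? canname 0 with
  | none => ""   -- Python raises IndexError here (canname empty); excluded by Pre_
  | some c0 =>
    let canname := if c0 == '-' then PySem.List.slice canname (some 1) none else canname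
    let canname := if PySem.List.slice canname none (some (-1)) == ['-'] then
                     PySem.List.slice canname none (some (-1)) else canname
    String.ofList canname

-- ===== PORT B =====
-- the junk-to-space substitution `c if (c.isalnum() or c == ':') else ' '` of Source B
def pvSub (c : Char) : Char := if pvKeep c then c else ' '

def CannonicizeString_alt (name : String) : String :=
  String.ofList (PySem.Chars.join ['-'] (PySem.Chars.split₀ (name.toList.map pvSub)))

-- ===== PRECONDITION & SPEC =====
-- Pre_ excludes exactly the inputs with no kept character, where A's `canname[0]` raises IndexError.
def Pre_CannonicizeString (name : String) : Prop := name.toList.any pvKeep = true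
instance (name : String) : Decidable (Pre_CannonicizeString name) := by
  unfold Pre_CannonicizeString; infer_instance

def pvWitness_CannonicizeString : String := "a:b c!"

def Spec_CannonicizeString (name : String) (out : String) : Prop := out = CannonicizeString_alt name
instance (name : String) (out : String) : Decidable (Spec_CannonicizeString name out) := by
  unfold Spec_CannonicizeString; infer_instance

-- ===== CLAIM (what is proved, stated in full; the proofs are below) =====
def Claim_equal_CannonicizeString : Prop := ∀ (name : String), Dom_CannonicizeString name → Pre_CannonicizeString name → Spec_CannonicizeString name (CannonicizeString name)

-- ===== LEMMAS AND PROOFS =====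

-- accumulator-free form of PySem.Chars.split₀.go
def pvTok : List Char → List Char → List (List Char)
  | [], cur => if cur.isEmpty then [] else [cur.reverse]
  | c :: rest, cur =>
      if PySem.Chars.isspace c then
        if cur.isEmpty then pvTok rest [] else cur.reverse :: pvTok rest []
      else pvTok rest (c :: cur)

-- what A's loop appends, as a function of the inJunk flag
def pvEmit : Bool → List Char → List Char
  | _, [] => []
  | j, c :: cs =>
      if pvKeep c then (if j then '-' :: c :: pvEmit false cs else c :: pvEmit false cs)
      else pvEmit true cs

theorem pvIsspace_space : PySem.Chars.isspace ' ' = true := by decide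

theorem pvGo_eq (l : List Char) : ∀ (cur : List Char) (acc : List (List Char)),
    PySem.Chars.split₀.go l cur acc = acc.reverse ++ pvTok l cur := by
  induction l with
  | nil => intro cur acc; by_cases h : cur.isEmpty <;>
      simp [PySem.Chars.split₀.go, pvTok, h]
  | cons c rest ih =>
    intro cur acc
    by_cases hs : PySem.Chars.isspace c <;> by_cases hc : cur.isEmpty <;>
      simp [PySem.Chars.split₀.go, pvTok, hs, hc, ih]

theorem pvSplit₀_eq (l : List Char) : PySem.Chars.split₀ l = pvTok l [] := by
  simp [PySem.Chars.split₀, pvGo_eq]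

theorem pvKeep_not_space (c : Char) (h : pvKeep c = true) : PySem.Chars.isspace c = false := by
  simp [pvKeep, PySem.Chars.isalnum, PySem.Chars.isalpha, PySem.Chars.isupper,
    PySem.Chars.islower, PySem.Chars.isdigit, Char.le_def, UInt32.le_iff_toNat_le] at h
  rcases h with ((⟨h1, h2⟩ | ⟨h1, h2⟩) | ⟨h1, h2⟩) | hc
  · simp [PySem.Chars.isspace] at *; omega
  · simp [PySem.Chars.isspace] at *; omega
  · simp [PySem.Chars.isspace] at *; omega
  · subst hc; decide

theorem pvKeep_ne_dash (c : Char) (h : pvKeep c = true) : c ≠ '-' := by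
  intro he; subst he; simp [pvKeep, PySem.Chars.isalnum, PySem.Chars.isalpha,
    PySem.Chars.isupper, PySem.Chars.islower, PySem.Chars.isdigit] at h

theorem pvSub_keep (c : Char) (h : pvKeep c = true) : pvSub c = c := by simp [pvSub, h]

theorem pvSub_junk (c : Char) (h : ¬ pvKeep c = true) : pvSub c = ' ' := by simp [pvSub, h]

theorem pvFoldA (l : List Char) : ∀ (out : List Char) (a j : Bool),
    (l.foldl (fun (st : List Char × Bool × Bool) c =>
      if pvKeep c then ((if st.2.2 then st.1 ++ ['-'] else st.1) ++ [c], true, false)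
      else (st.1, false, true)) (out, a, j)).1 = out ++ pvEmit j l := by
  induction l with
  | nil => intro out a j; simp [pvEmit]
  | cons c cs ih =>
    intro out a j
    by_cases hk : pvKeep c
    · by_cases hj : j <;> simp [pvEmit, hk, hj, ih]
    · simp [pvEmit, hk, ih]

theorem pvTok_ne (l : List Char) : ∀ (cur : List Char), cur ≠ [] → pvTok l cur ≠ [] := by
  induction l with
  | nil => intro cur h; simp [pvTok, List.isEmpty_iff, h]
  | cons c rest ih =>
    intro cur h
    by_cases hs : PySem.Chars.isspace c
    · have hc : cur.isEmpty = false := by simp [h]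
      simp [pvTok, hs, hc]
    · rw [pvTok, if_neg hs]
      exact ih (c :: cur) (by simp)

theorem pvTok_nil_iff (l : List Char) :
    pvTok (l.map pvSub) [] = [] ↔ l.any pvKeep = false := by
  induction l with
  | nil => simp [pvTok]
  | cons c cs ih =>
    by_cases hk : pvKeep c
    · have hs := pvKeep_not_space c hk
      simp [pvTok, pvSub_keep c hk, hk, hs, pvTok_ne (cs.map pvSub) [c] (by simp)]
    · simp [pvTok, pvSub_junk c hk, hk, pvIsspace_space, ih]

theorem pvMain (l : List Char) :
    (pvEmit true l = (if l.any pvKeep then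
        '-' :: PySem.Chars.join ['-'] (pvTok (l.map pvSub) []) else [])) ∧
    (∀ cur : List Char, cur ≠ [] →
      cur.reverse ++ pvEmit false l = PySem.Chars.join ['-'] (pvTok (l.map pvSub) cur)) := by
  induction l with
  | nil =>
    constructor
    · simp [pvEmit]
    · intro cur h
      have hc : cur.isEmpty = false := by simp [h]
      simp [pvEmit, pvTok, hc, PySem.Chars.join, List.intercalate]
  | cons c cs ih =>
    obtain ⟨ih1, ih2⟩ := ih
    by_cases hk : pvKeep c
    · have hs := pvKeep_not_space c hk
      have h2 := ih2 [c] (by simp)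
      constructor
      · simp [pvEmit, pvTok, pvSub_keep c hk, hk, hs, ← h2]
      · intro cur h
        have h2' := ih2 (c :: cur) (by simp)
        simp [pvEmit, pvTok, pvSub_keep c hk, hk, hs, ← h2']
    · constructor
      · simp [pvEmit, pvTok, pvSub_junk c hk, hk, pvIsspace_space, ih1]
      · intro cur h
        have hc : cur.isEmpty = false := by simp [h]
        have he : pvEmit false (c :: cs) = pvEmit true cs := by simp [pvEmit, hk]
        rw [he, List.map_cons, pvSub_junk c hk, pvTok, if_pos pvIsspace_space, hc,
          if_neg (by simp)]
        by_cases ha : cs.any pvKeep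
        · have hne : pvTok (cs.map pvSub) [] ≠ [] := by
            intro h0; rw [pvTok_nil_iff] at h0; simp [h0] at ha
          obtain ⟨t, ts, ht⟩ := List.exists_cons_of_ne_nil hne
          rw [ht, PySem.Chars.join_cons_cons, ih1, if_pos ha, ht]
          simp [PySem.Chars.join]
        · have h0 : pvTok (cs.map pvSub) [] = [] := (pvTok_nil_iff cs).mpr (by simpa using ha)
          rw [h0, ih1, if_neg (by simpa using ha)]
          simp [PySem.Chars.join, List.intercalate]

theorem pvHead (l : List Char) (h : l.any pvKeep = true) :
    ∃ d rest, PySem.Chars.join ['-'] (pvTok (l.map pvSub) []) = d :: rest ∧ pvKeep d = true := by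
  induction l with
  | nil => simp at h
  | cons c cs ih =>
    by_cases hk : pvKeep c
    · have hs := pvKeep_not_space c hk
      have h2 := (pvMain cs).2 [c] (by simp)
      refine ⟨c, pvEmit false cs, ?_, hk⟩
      rw [List.map_cons, pvSub_keep c hk, pvTok, if_neg (by simp [hs]), ← h2]
      simp
    · have ha : cs.any pvKeep = true := by
        simp [hk] at h; simpa using h
      obtain ⟨d, rest, hd, hkd⟩ := ih ha
      refine ⟨d, rest, ?_, hkd⟩
      rw [List.map_cons, pvSub_junk c hk, pvTok, if_pos pvIsspace_space]
      simpa using hd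

theorem pvDropLast_ne_dash (x : List Char) (d : Char) (rest : List Char)
    (hx : x = d :: rest) (hd : d ≠ '-') : (x.dropLast == ['-']) = false := by
  subst hx
  rcases rest with _ | ⟨r, rs⟩
  · simp
  · have : (d :: r :: rs).dropLast = d :: (r :: rs).dropLast := by simp
    simp [this, beq_iff_eq]
    intro h1 _; exact hd h1

-- ===== VERDICT (by name: the statement is the Claim_ definition above) =====
theorem CannonicizeString_spec : Claim_equal_CannonicizeString := by
  intro name _ hpre
  unfold Spec_CannonicizeString CannonicizeString CannonicizeString_alt
  rw [pvSplit₀_eq]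
  have hpre' : name.toList.any pvKeep = true := hpre
  have hfold := pvFoldA name.toList [] false false
  rcases hl : name.toList with _ | ⟨c, cs⟩
  · rw [hl] at hpre'; simp at hpre'
  · rw [hl] at hfold hpre'
    by_cases hk : pvKeep c
    · -- head kept: canname = c :: pvEmit false cs, neither strip fires
      have hs := pvKeep_not_space c hk
      have h2 := (pvMain cs).2 [c] (by simp)
      have hcan : pvEmit false (c :: cs) = c :: pvEmit false cs := by simp [pvEmit, hk]
      have hB : PySem.Chars.join ['-'] (pvTok ((c :: cs).map pvSub) []) = c :: pvEmit false cs := by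
        rw [List.map_cons, pvSub_keep c hk, pvTok, if_neg (by simp [hs]), ← h2]; simp
      have hdash := pvKeep_ne_dash c hk
      have hdl := pvDropLast_ne_dash (c :: pvEmit false cs) c (pvEmit false cs) rfl hdash
      simp only [hfold, hcan, List.nil_append]
      rw [hB]
      simp [PySem.List.pyGet?, PySem.List.pyIdx?, PySem.List.slice_to_neg_one, hdl, beq_iff_eq, hdash]
    · -- head junk: canname = '-' :: J and the leading dash is stripped
      have ha : cs.any pvKeep = true := by simp [hk] at hpre'; simpa using hpre'
      have hcan : pvEmit false (c :: cs) = pvEmit true cs := by simp [pvEmit, hk]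
      have hJ : pvEmit true cs =
          '-' :: PySem.Chars.join ['-'] (pvTok (cs.map pvSub) []) := by
        rw [(pvMain cs).1, if_pos ha]
      have hB : PySem.Chars.join ['-'] (pvTok ((c :: cs).map pvSub) []) =
          PySem.Chars.join ['-'] (pvTok (cs.map pvSub) []) := by
        rw [List.map_cons, pvSub_junk c hk, pvTok, if_pos pvIsspace_space]; simp
      obtain ⟨d, rest, hd, hkd⟩ := pvHead cs ha
      have hdash := pvKeep_ne_dash d hkd
      have hdl := pvDropLast_ne_dash _ d rest hd hdash
      simp only [hfold, hcan, hJ, List.nil_append]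
      rw [hB]
      simp [PySem.List.pyGet?, PySem.List.pyIdx?, PySem.List.slice_from_one, PySem.List.slice_to_neg_one, hdl]
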